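-- pv_equiv track=rewrite | github.com/bprzybysz/graphmcp | concrete/file_decommission_processor.py | _process_configuration
-- ===== SOURCE A (Python) =====
-- def _process_configuration(content: str, db_name: str, header: str) -> str:
--     """Comment out database configurations."""
--     lines = content.split('\n')
--     processed_lines = []
--     for line in lines:
--         if db_name.lower() in line.lower():
--             processed_lines.append(f"# {line}")
--         else:
--             processed_lines.append(line)
--     return header + '\n'.join(processed_lines)
-- ===== SOURCE B (Python) =====
-- def _process_configuration(content: str, db_name: str, header: str) -> str:
--     """Comment out database configurations.
--
--     Alternative single-pass implementation: stream over the characters once,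
--     buffering the current line and flushing it (with '# ' prepended when it
--     contains db_name case-insensitively) at each newline, instead of
--     split('\n') / loop / join.
--     """
--     needle = db_name.lower()
--     out = [header]
--     buf = []
--     for ch in content:
--         if ch == '\n':
--             line = ''.join(buf)
--             if needle in line.lower():
--                 out.append('# ')
--             out.append(line)
--             out.append('\n')
--             buf = []
--         else:
--             buf.append(ch)
--     line = ''.join(buf)
--     if needle in line.lower():
--         out.append('# ')
--     out.append(line)
--     return ''.join(out)
-- ===== Notes on version B (the rewrite author's own statement) =====
-- stated objective: alternative
-- what changed: Replaces split('\n')/per-line loop/join with one character-stream pass that buffers the current line and flushes it (prefixed with '# ' when it contains db_name case-insensitively) at each newline, building the output incrementally with no intermediate line list.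
import Mathlib
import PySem

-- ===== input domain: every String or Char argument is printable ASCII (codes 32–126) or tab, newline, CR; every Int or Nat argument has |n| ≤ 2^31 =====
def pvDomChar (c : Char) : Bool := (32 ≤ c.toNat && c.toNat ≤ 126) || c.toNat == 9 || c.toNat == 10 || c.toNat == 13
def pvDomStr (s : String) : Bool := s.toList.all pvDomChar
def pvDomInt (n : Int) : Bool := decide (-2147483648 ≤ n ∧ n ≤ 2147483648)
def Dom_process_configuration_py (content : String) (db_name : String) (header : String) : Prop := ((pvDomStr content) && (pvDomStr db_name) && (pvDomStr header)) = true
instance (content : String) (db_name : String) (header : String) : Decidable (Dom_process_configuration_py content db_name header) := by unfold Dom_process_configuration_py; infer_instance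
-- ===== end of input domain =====

-- B replaces A's split('\n')/per-line-loop/join with a single character-stream pass that
-- buffers the current line and flushes it at each newline (alternative decomposition, same cost).


-- ===== PORT A =====
-- lines = content.split('\n'); loop appending "# "+line or line; header + '\n'.join(...)
def process_configuration_py (content : String) (db_name : String) (header : String) : String :=
  let lines := PySem.Chars.splitOn content.toList ['\n']
  let processed := lines.foldl
    (fun acc line =>
      acc ++ [if PySem.Chars.isIn (PySem.Chars.lower db_name.toList) (PySem.Chars.lower line)
              then ['#', ' '] ++ line else line]) []
  String.mk (header.toList ++ PySem.Chars.join ['\n'] processed)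

-- ===== PORT B =====
-- flush of the buffered line: out + ('# ' if needle in line.lower() else '') + line
def pvFlushB (needle out buf : List Char) : List Char :=
  if PySem.Chars.isIn needle (PySem.Chars.lower buf) then out ++ ['#', ' '] ++ buf
  else out ++ buf

-- one loop step of B over a single character
def pvStepB (needle : List Char) (st : List Char × List Char) (ch : Char) : List Char × List Char :=
  if ch = '\n' then (pvFlushB needle st.1 st.2 ++ ['\n'], []) else (st.1, st.2 ++ [ch])

def process_configuration_py_alt (content : String) (db_name : String) (header : String) : String :=
  let needle := PySem.Chars.lower db_name.toList
  let st := content.toList.foldl (pvStepB needle) (header.toList, [])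
  String.mk (pvFlushB needle st.1 st.2)

-- ===== PRECONDITION & SPEC =====
def Spec_process_configuration_py (content : String) (db_name : String) (header : String) (out : String) : Prop := out = process_configuration_py_alt content db_name header
instance (content : String) (db_name : String) (header : String) (out : String) : Decidable (Spec_process_configuration_py content db_name header out) := by unfold Spec_process_configuration_py; infer_instance

-- ===== CLAIM (what is proved, stated in full; the proofs are below) =====
def Claim_equal_process_configuration_py : Prop := ∀ (content : String) (db_name : String) (header : String), Dom_process_configuration_py content db_name header → Spec_process_configuration_py content db_name header (process_configuration_py content db_name header)

-- ===== LEMMAS AND PROOFS =====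

-- reference splitter on '\n' (proof-only)
def pvSplitNl : List Char → List (List Char)
  | [] => [[]]
  | c :: rest =>
    if c = '\n' then [] :: pvSplitNl rest
    else match pvSplitNl rest with
      | [] => [[c]]
      | p :: ps => (c :: p) :: ps

def pvConsHead (p : List Char) : List (List Char) → List (List Char)
  | [] => [p]
  | q :: qs => (p ++ q) :: qs

theorem pvSplitNl_ne_nil (s : List Char) : pvSplitNl s ≠ [] := by
  cases s with
  | nil => simp [pvSplitNl]
  | cons c rest =>
    simp only [pvSplitNl]
    split
    · simp
    · split <;> simp

theorem pvJoin_cons (sep x : List Char) (l : List (List Char)) (h : l ≠ []) :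
    PySem.Chars.join sep (x :: l) = x ++ sep ++ PySem.Chars.join sep l := by
  cases l with
  | nil => exact absurd rfl h
  | cons y l' => simp [PySem.Chars.join, List.intercalate, List.flatten]

-- characterization of PySem.Chars.splitOn.go for the single-char separator '\n'
theorem pv_go_eq (fuel : Nat) (l cur : List Char) (acc : List (List Char))
    (h : l.length < fuel) :
    PySem.Chars.splitOn.go ['\n'] fuel l cur acc
      = acc.reverse ++ pvConsHead cur.reverse (pvSplitNl l) := by
  induction fuel generalizing l cur acc with
  | zero => omega
  | succ fuel ih =>
    cases l with
    | nil =>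
      simp [PySem.Chars.splitOn.go, pvSplitNl, pvConsHead]
    | cons c rest =>
      by_cases hc : c = '\n'
      · subst hc
        rw [show PySem.Chars.splitOn.go ['\n'] (fuel + 1) ('\n' :: rest) cur acc
              = PySem.Chars.splitOn.go ['\n'] fuel rest [] (cur.reverse :: acc) by
            simp [PySem.Chars.splitOn.go, List.isPrefixOf]]
        rw [ih rest [] (cur.reverse :: acc) (by simpa using Nat.lt_of_succ_lt_succ h)]
        cases hs : pvSplitNl rest with
        | nil => exact absurd hs (pvSplitNl_ne_nil rest)
        | cons p ps => simp [pvSplitNl, pvConsHead, hs]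
      · rw [show PySem.Chars.splitOn.go ['\n'] (fuel + 1) (c :: rest) cur acc
              = PySem.Chars.splitOn.go ['\n'] fuel rest (c :: cur) acc by
            simp only [PySem.Chars.splitOn.go, List.isPrefixOf]
            simp
            exact fun hh => absurd hh.symm hc]
        rw [ih rest (c :: cur) acc (by simpa using Nat.lt_of_succ_lt_succ h)]
        cases hs : pvSplitNl rest with
        | nil => exact absurd hs (pvSplitNl_ne_nil rest)
        | cons p ps => simp [pvSplitNl, pvConsHead, hs, hc]

theorem pvSplitOn_nl (s : List Char) :
    PySem.Chars.splitOn s ['\n'] = pvSplitNl s := by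
  rw [show PySem.Chars.splitOn s ['\n'] = PySem.Chars.splitOn.go ['\n'] (s.length + 1) s [] [] from rfl]
  rw [pv_go_eq (s.length + 1) s [] [] (by omega)]
  cases hs : pvSplitNl s with
  | nil => exact absurd hs (pvSplitNl_ne_nil s)
  | cons p ps => simp [pvConsHead]

-- the per-line marking both programs perform
def pvMark (needle line : List Char) : List Char :=
  if PySem.Chars.isIn needle (PySem.Chars.lower line) then ['#', ' '] ++ line else line

theorem pvFlushB_eq (needle out buf : List Char) :
    pvFlushB needle out buf = out ++ pvMark needle buf := by
  unfold pvFlushB pvMark; split <;> simp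

-- invariant of B's character loop
theorem pvB_loop (needle : List Char) (cs : List Char) :
    ∀ (out buf : List Char),
      pvFlushB needle (cs.foldl (pvStepB needle) (out, buf)).1 (cs.foldl (pvStepB needle) (out, buf)).2
        = out ++ PySem.Chars.join ['\n'] ((pvConsHead buf (pvSplitNl cs)).map (pvMark needle)) := by
  induction cs with
  | nil =>
    intro out buf
    simp [pvSplitNl, pvConsHead, PySem.Chars.join, List.intercalate, pvFlushB_eq]
  | cons c rest ih =>
    intro out buf
    by_cases hc : c = '\n'
    · subst hc
      simp only [List.foldl_cons]
      rw [show pvStepB needle (out, buf) '\n' = (pvFlushB needle out buf ++ ['\n'], []) from by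
            simp [pvStepB]]
      rw [ih (pvFlushB needle out buf ++ ['\n']) []]
      have hne : ((pvConsHead [] (pvSplitNl rest)).map (pvMark needle)) ≠ [] := by
        cases hs : pvSplitNl rest with
        | nil => exact absurd hs (pvSplitNl_ne_nil rest)
        | cons p ps => simp [pvConsHead]
      cases hs : pvSplitNl rest with
      | nil => exact absurd hs (pvSplitNl_ne_nil rest)
      | cons p ps =>
        rw [show pvConsHead buf (pvSplitNl ('\n' :: rest)) = buf :: pvSplitNl rest by
              simp [pvSplitNl, pvConsHead]]
        rw [hs]
        rw [List.map_cons, pvJoin_cons ['\n'] (pvMark needle buf) _ (by simp)]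
        simp [pvConsHead, pvFlushB_eq]
    · simp only [List.foldl_cons]
      rw [show pvStepB needle (out, buf) c = (out, buf ++ [c]) from by simp [pvStepB, hc]]
      rw [ih out (buf ++ [c])]
      have : pvConsHead buf (pvSplitNl (c :: rest)) = pvConsHead (buf ++ [c]) (pvSplitNl rest) := by
        cases hs : pvSplitNl rest with
        | nil => exact absurd hs (pvSplitNl_ne_nil rest)
        | cons p ps => simp [pvSplitNl, hc, hs, pvConsHead]
      rw [this]

-- ===== VERDICT (by name: the statement is the Claim_ definition above) =====
theorem process_configuration_py_spec : Claim_equal_process_configuration_py := by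
  intro content db_name header _
  unfold Spec_process_configuration_py process_configuration_py process_configuration_py_alt
  simp only []
  have hB := pvB_loop (PySem.Chars.lower db_name.toList) content.toList header.toList []
  rw [hB]
  rw [PySem.List.foldl_append_singleton_eq_map
        (fun line => if PySem.Chars.isIn (PySem.Chars.lower db_name.toList) (PySem.Chars.lower line)
                     then ['#', ' '] ++ line else line)]
  rw [pvSplitOn_nl]
  cases hs : pvSplitNl content.toList with
  | nil => exact absurd hs (pvSplitNl_ne_nil content.toList)
  | cons p ps => rfl
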